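-- pv_equiv track=rewrite | github.com/alexandraback/datacollection | solutions_5690574640250880_0/Python/Martixingwei/program.py | board_2_str
-- ===== SOURCE A (Python) =====
-- def board_2_str(board,row,col):
--         result = ""
--         for i in range(len(board)):
--                 for j in range(len(board[0])):
--                         if i==row and j==col:
--                                 result+='c'
--                         else:
--                                 result+=board[i][j]
--                 result+='\n'
--         return result[:-1]
-- ===== SOURCE B (Python) =====
-- def board_2_str(board, row, col):
--     if not board:
--         return ""
--     n = len(board[0])
--     lines = [''.join(r[:n]) for r in board]
--     if 0 <= row < len(board) and 0 <= col < n: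
--         cells = list(board[row][:n])
--         cells[col] = 'c'
--         lines[row] = ''.join(cells)
--     return '\n'.join(lines)
-- ===== Notes on version B (the rewrite author's own statement) =====
-- stated objective: simpler
-- what changed: B builds each line once with ''.join over the row's first len(board[0]) cells and patches the single marked cell at the cell level before '\n'.join, instead of A's per-cell branch inside nested loops with repeated string += and a final [:-1] trim.
-- outside the precondition, e.g. on board_2_str([['a', 'b'], ['c']], 1, 1): A returns 'ab\ncc', B raises IndexError
import Mathlib
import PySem

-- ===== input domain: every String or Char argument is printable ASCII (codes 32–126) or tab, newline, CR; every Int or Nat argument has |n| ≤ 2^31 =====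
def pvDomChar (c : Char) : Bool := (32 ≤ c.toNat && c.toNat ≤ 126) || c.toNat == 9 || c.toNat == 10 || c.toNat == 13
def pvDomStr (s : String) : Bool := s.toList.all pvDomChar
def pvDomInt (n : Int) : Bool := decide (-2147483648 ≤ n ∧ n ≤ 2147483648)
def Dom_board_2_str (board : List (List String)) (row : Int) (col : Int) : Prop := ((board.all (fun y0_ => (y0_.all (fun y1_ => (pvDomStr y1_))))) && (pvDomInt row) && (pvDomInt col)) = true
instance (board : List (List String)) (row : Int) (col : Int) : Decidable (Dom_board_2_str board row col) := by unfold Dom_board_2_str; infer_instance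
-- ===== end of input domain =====

-- B builds each line once (join over the row's first len(board[0]) cells) and patches the
-- single marked cell at cell level before '\n'.join, instead of A's per-cell branch inside
-- nested loops with repeated += and a final [:-1] trim; objective: simpler.

-- ===== PORT A =====
def board_2_str (board : List (List String)) (row : Int) (col : Int) : String :=
  PySem.Str.slice
    ((PySem.List.pyRange 0 (board.length : Int) 1).foldl
      (fun result i =>
        ((PySem.List.pyRange 0 ((PySem.List.pyGetD board 0 []).length : Int) 1).foldl
          (fun result j =>
            if i == row && j == col then result ++ "c"
            else result ++ PySem.List.pyGetD (PySem.List.pyGetD board i []) j "")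
          result) ++ "\n")
      "")
    none (some (-1))


-- ===== PORT B =====
def board_2_str_alt (board : List (List String)) (row : Int) (col : Int) : String :=
  match board with
  | [] => ""
  | r0 :: _ =>
    let n : Int := (r0.length : Int)
    let lines := board.map (fun r => PySem.Str.join "" (PySem.List.slice r none (some n)))
    let lines :=
      if 0 ≤ row ∧ row < (board.length : Int) ∧ 0 ≤ col ∧ col < n then
        let cells := PySem.List.slice (PySem.List.pyGetD board row []) none (some n)
        let cells := PySem.List.pySetD cells col "c"
        PySem.List.pySetD lines row (PySem.Str.join "" cells)
      else lines
    PySem.Str.join "\n" lines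

-- ===== PRECONDITION & SPEC =====
-- Pre_ excludes ragged boards (a row shorter than len(board[0])): there A raises IndexError,
-- except in the accidental case where every missing cell is exactly the marked one.
def Pre_board_2_str (board : List (List String)) (row : Int) (col : Int) : Prop :=
  ∀ r ∈ board, (board.headD []).length ≤ r.length
instance (board : List (List String)) (row : Int) (col : Int) : Decidable (Pre_board_2_str board row col) := by unfold Pre_board_2_str; infer_instance

def pvWitness_board_2_str : List (List String) × Int × Int := ([["a", "bb"], ["x", "y"]], 0, 1)

def Spec_board_2_str (board : List (List String)) (row : Int) (col : Int) (out : String) : Prop := out = board_2_str_alt board row col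
instance (board : List (List String)) (row : Int) (col : Int) (out : String) : Decidable (Spec_board_2_str board row col out) := by unfold Spec_board_2_str; infer_instance

-- ===== CLAIM (what is proved, stated in full; the proofs are below) =====
def Claim_equal_board_2_str : Prop := ∀ (board : List (List String)) (row : Int) (col : Int), Dom_board_2_str board row col → Pre_board_2_str board row col → Spec_board_2_str board row col (board_2_str board row col)

-- ===== LEMMAS AND PROOFS =====

theorem pv_join_empty_nil : PySem.Str.join "" ([] : List String) = "" := by
  rw [← String.toList_inj]; simp [PySem.Chars.join_nil]

theorem pv_chars_join_empty_cons (a : List Char) (t : List (List Char)) :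
    PySem.Chars.join [] (a :: t) = a ++ PySem.Chars.join [] t := by
  cases t with
  | nil => simp [PySem.Chars.join_nil, PySem.Chars.join_singleton]
  | cons b t => simp [PySem.Chars.join_cons_cons]

theorem pv_join_empty_cons (a : String) (t : List String) :
    PySem.Str.join "" (a :: t) = a ++ PySem.Str.join "" t := by
  rw [← String.toList_inj]; simp [pv_chars_join_empty_cons]

theorem pv_foldl_str {α : Type} (l : List α) (g : α → String) (s : String) :
    l.foldl (fun res x => res ++ g x) s = s ++ PySem.Str.join "" (l.map g) := by
  induction l generalizing s with
  | nil => simp [pv_join_empty_nil]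
  | cons a t ih => simp only [List.foldl_cons, List.map_cons, pv_join_empty_cons, ih,
      String.append_assoc]

theorem pv_join_ne_nil (ls : List (List Char)) (h : ls ≠ []) :
    PySem.Chars.join [] (ls.map (fun l => l ++ ['\n'])) ≠ [] := by
  cases ls with
  | nil => simp at h
  | cons a t => rw [List.map_cons, pv_chars_join_empty_cons]; simp

theorem pv_join_newline (ls : List (List Char)) :
    (PySem.Chars.join [] (ls.map (fun l => l ++ ['\n']))).dropLast
      = PySem.Chars.join ['\n'] ls := by
  induction ls with
  | nil => simp [PySem.Chars.join_nil]
  | cons a t ih =>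
    cases t with
    | nil => simp [PySem.Chars.join_singleton]
    | cons b t =>
      rw [List.map_cons, pv_chars_join_empty_cons,
        List.dropLast_append_of_ne_nil (pv_join_ne_nil _ (by simp)), ih,
        PySem.Chars.join_cons_cons]

theorem pv_getD_zero {α : Type} (l : List α) (d : α) : l.getD 0 d = l.headD d := by
  cases l <;> simp

theorem pv_map_pyGetD_take {α : Type} (r : List α) (d : α) (n : Nat) (h : n ≤ r.length) :
    (PySem.List.pyRange 0 (n : Int) 1).map (fun j => PySem.List.pyGetD r j d) = r.take n := by
  apply List.ext_getElem
  · simp [PySem.List.length_pyRange_one]; omega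
  · intro k h1 h2
    simp only [List.getElem_map, PySem.List.getElem_pyRange_one]
    have hk : k < n := by simpa [PySem.List.length_pyRange_one] using h1
    have hz : ((0 : Int) + (k : Int)) = (k : Int) := by omega
    rw [hz, PySem.List.pyGetD_natCast, List.getElem_take]
    exact List.getD_eq_getElem r d (by omega)

theorem pv_row_unmarked (r : List String) (n : Nat) (h : n ≤ r.length) (i row col : Int)
    (hne : i ≠ row ∨ ¬(0 ≤ col ∧ col < (n : Int))) :
    (PySem.List.pyRange 0 (n : Int) 1).map
        (fun j => if i == row && j == col then "c" else PySem.List.pyGetD r j "")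
      = r.take n := by
  rw [← pv_map_pyGetD_take r "" n h]
  apply List.map_congr_left
  intro j hj
  rw [PySem.List.mem_pyRange_one] at hj
  have : ¬(i == row && j == col) = true := by
    rcases hne with h' | h' <;> simp_all <;> omega
  simp [this]

theorem pv_row_marked (r : List String) (n : Nat) (h : n ≤ r.length) (row col : Int)
    (h3 : 0 ≤ col) (h4 : col < (n : Int)) :
    (PySem.List.pyRange 0 (n : Int) 1).map
        (fun j => if row == row && j == col then "c" else PySem.List.pyGetD r j "")
      = (r.take n).set col.toNat "c" := by
  apply List.ext_getElem
  · simp [PySem.List.length_pyRange_one]; omega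
  · intro k h1 h2
    have hk : k < n := by simpa [PySem.List.length_pyRange_one] using h1
    simp only [List.getElem_map, PySem.List.getElem_pyRange_one]
    have hz : ((0 : Int) + (k : Int)) = (k : Int) := by omega
    rw [hz, List.getElem_set]
    by_cases hc : (k : Int) = col
    · have : col.toNat = k := by omega
      simp [hc, this]
    · have hcn : ¬ (col.toNat = k) := by omega
      have hb : ((k : Int) == col) = false := by simp [hc]
      simp only [hcn, if_false, beq_self_eq_true, hb, Bool.and_false, Bool.true_and]
      rw [PySem.List.pyGetD_natCast, List.getElem_take]
      exact List.getD_eq_getElem r "" (by omega)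

theorem pv_hA (board : List (List String)) (row col : Int) :
    board_2_str board row col = PySem.Str.slice
      (PySem.Str.join "" ((PySem.List.pyRange 0 (board.length : Int) 1).map
        (fun i => PySem.Str.join "" ((PySem.List.pyRange 0 (((board.headD []).length : Int)) 1).map
            (fun j => if i == row && j == col then "c"
                      else PySem.List.pyGetD (PySem.List.pyGetD board i []) j "")) ++ "\n")))
      none (some (-1)) := by
  unfold board_2_str
  rw [show ((PySem.List.pyGetD board 0 []).length : Int) = ((board.headD []).length : Int) by
    rw [show PySem.List.pyGetD board 0 [] = board.getD 0 [] from PySem.List.pyGetD_natCast board 0 [],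
      pv_getD_zero]]
  rw [PySem.List.foldl_congr_mem _ _
    (fun (res : String) i => res ++ (PySem.Str.join ""
      ((PySem.List.pyRange 0 (((board.headD []).length : Int)) 1).map
        (fun j => if i == row && j == col then "c"
                  else PySem.List.pyGetD (PySem.List.pyGetD board i []) j "")) ++ "\n")) ""
    ?_]
  · rw [pv_foldl_str]; simp
  · intro acc i _
    have hfun : (fun (res : String) j => if i == row && j == col then res ++ "c"
          else res ++ PySem.List.pyGetD (PySem.List.pyGetD board i []) j "")
        = (fun (res : String) j => res ++ (if i == row && j == col then "c"
          else PySem.List.pyGetD (PySem.List.pyGetD board i []) j "")) := by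
      funext res j; split <;> rfl
    rw [hfun, pv_foldl_str, String.append_assoc]

theorem pv_lines (r0 : List String) (rest : List (List String)) (row col : Int)
    (hpre : ∀ r ∈ r0 :: rest, r0.length ≤ r.length) :
    ((PySem.List.pyRange 0 (((r0 :: rest).length : Int)) 1).map
      (fun i => PySem.Str.join "" ((PySem.List.pyRange 0 ((r0.length : Int)) 1).map
        (fun j => if i == row && j == col then "c"
                  else PySem.List.pyGetD (PySem.List.pyGetD (r0 :: rest) i []) j ""))))
    =
    (if 0 ≤ row ∧ row < (((r0 :: rest).length : Int)) ∧ 0 ≤ col ∧ col < ((r0.length : Int)) then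
        PySem.List.pySetD
          ((r0 :: rest).map (fun r => PySem.Str.join "" (PySem.List.slice r none (some (r0.length : Int)))))
          row
          (PySem.Str.join "" (PySem.List.pySetD
            (PySem.List.slice (PySem.List.pyGetD (r0 :: rest) row []) none (some (r0.length : Int))) col "c"))
      else
        (r0 :: rest).map (fun r => PySem.Str.join "" (PySem.List.slice r none (some (r0.length : Int))))) := by
  have hslice : ∀ r : List String,
      PySem.List.slice r none (some (r0.length : Int)) = r.take r0.length :=
    fun r => PySem.List.slice_to_natCast r r0.length
  split
  case isTrue hG =>
    obtain ⟨h1, h2, h3, h4⟩ := hG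
    have hbd : PySem.List.pyGetD (r0 :: rest) row [] = (r0 :: rest)[row.toNat]'(by omega) := by
      rw [PySem.List.pyGetD_of_nonneg _ _ h1]
      exact List.getD_eq_getElem _ _ (by omega)
    rw [PySem.List.pySetD_of_nonneg _ _ h1]
    apply List.ext_getElem
    · simp [PySem.List.length_pyRange_one]
    · intro k hk1 hk2
      have hklen : k < (r0 :: rest).length := by
        simpa [PySem.List.length_pyRange_one] using hk1
      simp only [List.getElem_map, PySem.List.getElem_pyRange_one, List.getElem_set]
      have hz : ((0 : Int) + (k : Int)) = (k : Int) := by omega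
      rw [hz]
      have hbk : PySem.List.pyGetD (r0 :: rest) (k : Int) [] = (r0 :: rest)[k] := by
        rw [PySem.List.pyGetD_natCast]
        exact List.getD_eq_getElem _ _ hklen
      rw [hbk]
      by_cases hkr : row.toNat = k
      · have hkre : (k : Int) = row := by omega
        simp only [if_pos hkr]
        rw [hkre, pv_row_marked _ r0.length (hpre _ (List.getElem_mem _)) row col h3 (by exact_mod_cast h4)]
        rw [hslice, hbd, PySem.List.pySetD_of_nonneg _ _ h3]
        simp only [hkr]
      · simp only [if_neg hkr, List.getElem_map]
        rw [pv_row_unmarked _ r0.length (hpre _ (List.getElem_mem _)) _ row col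
          (Or.inl (by omega)), hslice]
  case isFalse hG =>
    apply List.ext_getElem
    · simp [PySem.List.length_pyRange_one]
    · intro k hk1 hk2
      have hklen : k < (r0 :: rest).length := by
        simpa [PySem.List.length_pyRange_one] using hk1
      simp only [List.getElem_map, PySem.List.getElem_pyRange_one]
      have hz : ((0 : Int) + (k : Int)) = (k : Int) := by omega
      rw [hz]
      have hbk : PySem.List.pyGetD (r0 :: rest) (k : Int) [] = (r0 :: rest)[k] := by
        rw [PySem.List.pyGetD_natCast]
        exact List.getD_eq_getElem _ _ hklen
      rw [hbk]
      have hne : (k : Int) ≠ row ∨ ¬(0 ≤ col ∧ col < ((r0.length : Int))) := by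
        by_cases hc : 0 ≤ col ∧ col < ((r0.length : Int))
        · left
          intro heq
          exact hG ⟨by omega, by push_cast; omega, hc.1, hc.2⟩
        · right; exact hc
      rw [pv_row_unmarked _ r0.length (hpre _ (List.getElem_mem _)) _ row col hne, hslice]

theorem pv_hB (r0 : List String) (rest : List (List String)) (row col : Int) :
    board_2_str_alt (r0 :: rest) row col = PySem.Str.join "\n"
      (if 0 ≤ row ∧ row < (((r0 :: rest).length : Int)) ∧ 0 ≤ col ∧ col < ((r0.length : Int)) then
        PySem.List.pySetD
          ((r0 :: rest).map (fun r => PySem.Str.join "" (PySem.List.slice r none (some (r0.length : Int)))))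
          row
          (PySem.Str.join "" (PySem.List.pySetD
            (PySem.List.slice (PySem.List.pyGetD (r0 :: rest) row []) none (some (r0.length : Int))) col "c"))
      else
        (r0 :: rest).map (fun r => PySem.Str.join "" (PySem.List.slice r none (some (r0.length : Int))))) := rfl

theorem pv_newline_toList : ("\n" : String).toList = ['\n'] := by decide

theorem pv_board_2_str_agrees (board : List (List String)) (row col : Int)
    (hpre : ∀ r ∈ board, (board.headD []).length ≤ r.length) :
    board_2_str board row col = board_2_str_alt board row col := by
  cases board with
  | nil =>
    rw [pv_hA, ← String.toList_inj]
    simp [board_2_str_alt, PySem.Str.slice_to_neg_one, PySem.Str.toList_join,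
      PySem.List.pyRange_one_eq_nil (le_refl (0 : Int)), PySem.Chars.join_nil,
      PySem.List.slice]
  | cons r0 rest =>
    have hpre' : ∀ r ∈ r0 :: rest, r0.length ≤ r.length := by simpa using hpre
    rw [pv_hA, pv_hB, ← String.toList_inj, PySem.Str.slice_to_neg_one,
      PySem.Str.toList_join, PySem.Str.toList_join, ← pv_lines r0 rest row col hpre',
      pv_newline_toList, ← pv_join_newline]
    simp only [List.headD_cons, String.toList_empty, List.map_map]
    refine congrArg (fun l => (PySem.Chars.join [] l).dropLast) (List.map_congr_left ?_)
    intro i _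
    simp [Function.comp, String.toList_append, pv_newline_toList]

-- ===== VERDICT (by name: the statement is the Claim_ definition above) =====
theorem board_2_str_spec : Claim_equal_board_2_str := by
  intro board row col _ hpre
  unfold Spec_board_2_str
  exact pv_board_2_str_agrees board row col hpre
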